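-- pv_equiv track=rewrite | github.com/krafton-ai/Prompt2Policy | src/p2p/training/reward_loader.py | _split_equation_description
-- ===== SOURCE A (Python) =====
-- def _split_equation_description(text: str) -> tuple[str, str]:
--     """Split ``r_{x} = ... (description)`` into ``(latex, description)``.
--
--     Uses balanced parenthesis counting from the right so that LaTeX like
--     ``\\max(0, z)`` is not broken.  The trailing ``(...)`` is only treated as a
--     description if its content is plain text (no ``\\``, ``{``, ``}``, ``=``,
--     ``_``).
--     """
--     text = text.strip()
--     if not text.endswith(")"):
--         return text, ""
--     depth = 0
--     for i in range(len(text) - 1, -1, -1):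
--         if text[i] == ")":
--             depth += 1
--         elif text[i] == "(":
--             depth -= 1
--             if depth == 0:
--                 candidate_desc = text[i + 1 : -1].strip()
--                 candidate_latex = text[:i].strip()
--                 # Plain-text description should not contain math symbols
--                 if not any(c in candidate_desc for c in "\\{}=_"):
--                     return candidate_latex, candidate_desc
--                 # It's part of the equation — no separate description
--                 return text, ""
--     return text, ""
-- ===== SOURCE B (Python) =====
-- def _split_equation_description(text: str) -> tuple[str, str]:
--     """Split ``latex (description)`` using a left-to-right stack of '(' indices."""
--     text = text.strip()
--     if not text.endswith(")"):
--         return text, ""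
--     stack = []
--     for i, c in enumerate(text[:-1]):
--         if c == "(":
--             stack.append(i)
--         elif c == ")" and stack:
--             stack.pop()
--     if not stack:
--         return text, ""
--     i = stack[-1]
--     candidate_desc = text[i + 1 : -1].strip()
--     candidate_latex = text[:i].strip()
--     if not any(c in candidate_desc for c in "\\{}=_"):
--         return candidate_latex, candidate_desc
--     return text, ""
-- ===== Notes on version B (the rewrite author's own statement) =====
-- stated objective: alternative
-- what changed: Replaces A's right-to-left depth-counting scan over the whole string with a single left-to-right pass that maintains a stack of open-paren indices, skipping unmatched close parens, and then pops the stack top as the match of the trailing close paren.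
import Mathlib
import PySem

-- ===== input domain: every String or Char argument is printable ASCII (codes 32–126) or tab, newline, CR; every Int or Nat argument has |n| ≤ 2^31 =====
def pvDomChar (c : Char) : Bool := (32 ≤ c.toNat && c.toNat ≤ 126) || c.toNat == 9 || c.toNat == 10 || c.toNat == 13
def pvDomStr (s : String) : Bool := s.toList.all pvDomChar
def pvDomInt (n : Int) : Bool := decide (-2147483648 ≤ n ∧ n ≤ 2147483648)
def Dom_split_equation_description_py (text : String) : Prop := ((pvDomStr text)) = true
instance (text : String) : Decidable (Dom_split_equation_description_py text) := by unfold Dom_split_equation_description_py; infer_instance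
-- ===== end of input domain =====

-- B replaces A's right-to-left depth-counting scan by a single left-to-right pass with a
-- stack of '(' indices (alternative decomposition; same O(n) cost).

-- ===== PORT A =====
-- A's loop 'for i in range(len(text)-1, -1, -1)' with its early returns, as descending
-- recursion; the first argument k is i+1 (how many indices remain); returns the index at
-- which depth hits 0 on '(', or none when the loop falls through.
def splitAScan (cs : List Char) : Nat → Int → Option Int
  | 0, _ => none
  | k+1, depth =>
    let c := cs.getD k ' '
    if c = ')' then splitAScan cs k (depth + 1)
    else if c = '(' then
      let d := depth - 1
      if d = 0 then some (k : Int) else splitAScan cs k d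
    else splitAScan cs k depth

def split_equation_description_py (text : String) : String × String :=
  let t := PySem.Str.strip text
  if ¬ (PySem.Str.endswith t ")" = true) then (t, "")
  else
    match splitAScan t.toList t.toList.length 0 with
    | some i =>
      let candidate_desc := PySem.Str.strip (PySem.Str.slice t (some (i + 1)) (some (-1)))
      let candidate_latex := PySem.Str.strip (PySem.Str.slice t none (some i))
      -- any(c in candidate_desc for c in "\{}=_")
      if ¬ (("\\{}=_".toList).any (fun c => PySem.Str.isIn (String.ofList [c]) candidate_desc) = true) then
        (candidate_latex, candidate_desc)
      else (t, "")
    | none => (t, "")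

-- ===== PORT B =====
-- The Python stack (append / stack[-1] / pop at the end) is mirrored as a Lean list whose
-- HEAD is the top of the stack.
def split_equation_description_py_alt (text : String) : String × String :=
  let t := PySem.Str.strip text
  if ¬ (PySem.Str.endswith t ")" = true) then (t, "")
  else
    let stack := (PySem.List.enumerate (PySem.Str.slice t none (some (-1))).toList 0).foldl
      (fun st p => if p.2 = '(' then p.1 :: st
                   else if p.2 = ')' ∧ st ≠ [] then st.tail else st) ([] : List Int)
    match stack with
    | [] => (t, "")
    | i :: _ =>
      let candidate_desc := PySem.Str.strip (PySem.Str.slice t (some (i + 1)) (some (-1)))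
      let candidate_latex := PySem.Str.strip (PySem.Str.slice t none (some i))
      if ¬ (("\\{}=_".toList).any (fun c => PySem.Str.isIn (String.ofList [c]) candidate_desc) = true) then
        (candidate_latex, candidate_desc)
      else (t, "")

-- ===== PRECONDITION & SPEC =====
def Spec_split_equation_description_py (text : String) (out : String × String) : Prop := out = split_equation_description_py_alt text
instance (text : String) (out : String × String) : Decidable (Spec_split_equation_description_py text out) := by unfold Spec_split_equation_description_py; infer_instance

-- ===== CLAIM (what is proved, stated in full; the proofs are below) =====
def Claim_equal_split_equation_description_py : Prop := ∀ (text : String), Dom_split_equation_description_py text → Spec_split_equation_description_py text (split_equation_description_py text)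

-- ===== LEMMAS AND PROOFS =====

-- The stack B has built after the first k characters of cs (head = top).
def pvStackOf (cs : List Char) (k : Nat) : List Int :=
  (PySem.List.enumerate (cs.take k) 0).foldl
    (fun st p => if p.2 = '(' then p.1 :: st
                 else if p.2 = ')' ∧ st ≠ [] then st.tail else st) ([] : List Int)

lemma splitAScan_succ (cs : List Char) (k : Nat) (depth : Int) :
    splitAScan cs (k+1) depth =
      (if cs.getD k ' ' = ')' then splitAScan cs k (depth + 1)
       else if cs.getD k ' ' = '(' then
         (if depth - 1 = 0 then some (k : Int) else splitAScan cs k (depth - 1))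
       else splitAScan cs k depth) := rfl

lemma pvStackOf_succ (cs : List Char) (k : Nat) (hk : k < cs.length) :
    pvStackOf cs (k+1) =
      (if cs[k] = '(' then (k : Int) :: pvStackOf cs k
       else if cs[k] = ')' ∧ pvStackOf cs k ≠ [] then (pvStackOf cs k).tail
       else pvStackOf cs k) := by
  have htake : cs.take (k+1) = cs.take k ++ [cs[k]] := by
    rw [List.take_add_one, List.getElem?_eq_getElem hk]; rfl
  rw [pvStackOf, htake, PySem.List.enumerate_append, List.foldl_append]
  simp [PySem.List.enumerate_cons, PySem.List.enumerate_nil, pvStackOf,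
    Nat.min_eq_left (Nat.le_of_lt hk)]

-- A's right-to-left scan of the first k characters with depth d >= 1 finds exactly the
-- (d-1)-th element (from the top) of B's stack after those k characters.
lemma scan_eq_stack (cs : List Char) : ∀ (k : Nat) (d : Int), 1 ≤ d →
    splitAScan cs k d = (pvStackOf cs k)[(d - 1).toNat]? := by
  intro k
  induction k with
  | zero =>
    intro d _
    simp [splitAScan, pvStackOf]
  | succ k ih =>
    intro d hd
    by_cases hk : k < cs.length
    · have hget : cs.getD k ' ' = cs[k] := by
        simp [List.getD, List.getElem?_eq_getElem hk]
      rw [splitAScan_succ, hget, pvStackOf_succ cs k hk]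
      by_cases hc1 : cs[k] = ')'
      · -- pop (if nonempty) / depth + 1
        rw [if_pos hc1, ih (d+1) (by omega)]
        rcases hS : pvStackOf cs k with _ | ⟨h, t⟩
        · simp [hc1]
        · have h1 : (d + 1 - 1).toNat = (d - 1).toNat + 1 := by omega
          rw [h1]
          simp [hc1]
      · by_cases hc2 : cs[k] = '('
        · -- push k
          rw [if_neg hc1, if_pos hc2, if_pos hc2]
          by_cases hd1 : d = 1
          · subst hd1
            norm_num
          · rw [if_neg (by omega), ih (d-1) (by omega)]
            have h1 : (d - 1).toNat = (d - 1 - 1).toNat + 1 := by omega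
            rw [h1]
            simp
        · -- other character: both unchanged
          rw [if_neg hc1, if_neg hc2, if_neg hc2, ih d hd]
          have : ¬ (cs[k] = ')' ∧ pvStackOf cs k ≠ []) := by
            intro h; exact hc1 h.1
          rw [if_neg this]
    · -- index past the end: getD yields the default ' ', take is unchanged
      have hge : cs.length ≤ k := Nat.le_of_not_lt hk
      have hget : cs.getD k ' ' = ' ' := by
        simp [List.getD, List.getElem?_eq_none hge]
      have htake : cs.take (k+1) = cs.take k := by
        rw [List.take_of_length_le (by omega), List.take_of_length_le hge]
      rw [splitAScan_succ, hget, if_neg (by decide), if_neg (by decide),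
        show pvStackOf cs (k+1) = pvStackOf cs k by rw [pvStackOf, htake]; rfl]
      exact ih d hd

lemma ports_eq (text : String) :
    split_equation_description_py text = split_equation_description_py_alt text := by
  unfold split_equation_description_py split_equation_description_py_alt
  cases he : PySem.Chars.endswith (PySem.Chars.strip text.toList) [')'] with
  | false => rw [if_pos (by simp [he]), if_pos (by simp [he])]
  | true =>
    rw [if_neg (by simp [he]), if_neg (by simp [he])]
    set t := PySem.Str.strip text with ht
    -- t ends with ')': t.toList = as ++ [')']
    have hsuf : [')'] <:+ t.toList := by
      rw [ht, PySem.Str.toList_strip]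
      exact (PySem.Chars.endswith_iff _ _).mp he
    obtain ⟨as, has⟩ := hsuf
    have hlen : t.toList.length = as.length + 1 := by rw [← has]; simp
    -- B's stack is pvStackOf over the first as.length characters
    have hdrop : (PySem.Str.slice t none (some (-1))).toList = t.toList.dropLast :=
      PySem.Str.slice_to_neg_one t
    have hdl : t.toList.dropLast = as := by rw [← has]; simp
    have htk : t.toList.take as.length = as := by rw [← has]; simp
    have hBstack : (PySem.List.enumerate (PySem.Str.slice t none (some (-1))).toList 0).foldl
        (fun st (p : Int × Char) => if p.2 = '(' then p.1 :: st
                   else if p.2 = ')' ∧ st ≠ [] then st.tail else st) ([] : List Int)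
        = pvStackOf t.toList as.length := by
      rw [hdrop, hdl, pvStackOf, htk]
    -- A's scan: the first step consumes the final ')', then scan_eq_stack applies
    have hlast : t.toList.getD as.length ' ' = ')' := by
      rw [← has]
      simp [List.getD]
    have hA : splitAScan t.toList t.toList.length 0 = (pvStackOf t.toList as.length)[(0:Nat)]? := by
      rw [hlen, splitAScan_succ, hlast, if_pos rfl]
      have h1 := scan_eq_stack t.toList as.length 1 (by omega)
      simpa using h1
    rw [hA, hBstack]
    cases hS : pvStackOf t.toList as.length with
    | nil => rfl
    | cons i rest => rfl

-- ===== VERDICT (by name: the statement is the Claim_ definition above) =====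
theorem split_equation_description_py_spec : Claim_equal_split_equation_description_py := by
  intro text _
  unfold Spec_split_equation_description_py
  exact ports_eq text
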